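-- pv_equiv track=rewrite | github.com/kogamishinyajerry-ops/ai-fantui-logicmvp | tools/validate_debug_json_schema.py | summarize_cli_failure
-- ===== SOURCE A (Python) =====
-- def summarize_cli_failure(stdout_text: str, stderr_text: str) -> str | None:
--     summary_lines = []
--     for text in (stderr_text, stdout_text):
--         for line in text.splitlines():
--             stripped = line.strip()
--             if not stripped or stripped.startswith("usage:"):
--                 continue
--             if ": error:" in stripped:
--                 stripped = stripped.split(": error:", maxsplit=1)[1].strip()
--             summary_lines.append(stripped)
--     return summary_lines[-1] if summary_lines else None
-- ===== SOURCE B (Python) =====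
-- def summarize_cli_failure(stdout_text: str, stderr_text: str) -> str | None:
--     # Reverse scan with early exit: stdout's last qualifying line wins, else stderr's.
--     for text in (stdout_text, stderr_text):
--         for line in reversed(text.splitlines()):
--             stripped = line.strip()
--             if not stripped or stripped.startswith("usage:"):
--                 continue
--             if ": error:" in stripped:
--                 stripped = stripped.split(": error:", 1)[1].strip()
--             return stripped
--     return None
-- ===== Notes on version B (the rewrite author's own statement) =====
-- stated objective: simpler
-- what changed: Instead of accumulating every qualifying line into a list and taking its last element, B scans stdout's lines in reverse (then stderr's) and returns the first qualifying line directly, with no intermediate list.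
import Mathlib
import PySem

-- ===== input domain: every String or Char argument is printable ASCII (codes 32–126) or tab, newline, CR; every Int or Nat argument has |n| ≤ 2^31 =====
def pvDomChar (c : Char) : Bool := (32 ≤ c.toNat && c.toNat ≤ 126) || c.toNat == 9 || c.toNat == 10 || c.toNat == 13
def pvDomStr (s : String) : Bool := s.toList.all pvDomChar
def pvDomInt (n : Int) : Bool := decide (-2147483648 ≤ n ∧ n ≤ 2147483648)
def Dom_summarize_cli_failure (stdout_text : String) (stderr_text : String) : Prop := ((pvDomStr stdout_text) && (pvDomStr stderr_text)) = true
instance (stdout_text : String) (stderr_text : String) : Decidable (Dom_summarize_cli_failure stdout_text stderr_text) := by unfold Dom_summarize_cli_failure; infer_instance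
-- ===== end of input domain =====

-- ===== PORT A =====
def summarize_cli_failure (stdout_text : String) (stderr_text : String) : Option String :=
  let summary_lines :=
    [stderr_text, stdout_text].foldl (fun acc text =>
      (PySem.Str.splitlines text).foldl (fun acc line =>
        let stripped := PySem.Str.strip line
        if stripped = "" || PySem.Str.startswith stripped "usage:" then acc
        else if PySem.Str.isIn ": error:" stripped then
          acc ++ [PySem.Str.strip (((PySem.Str.splitMax? stripped ": error:" 1).getD []).getD 1 "")]
        else acc ++ [stripped]) acc) []
  summary_lines.getLast?

-- ===== PORT B =====
-- first qualifying line of a (reversed) line list, early exit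
def pvPickFirst : List String -> Option String
  | [] => none
  | line :: rest =>
    let stripped := PySem.Str.strip line
    if stripped = "" || PySem.Str.startswith stripped "usage:" then pvPickFirst rest
    else if PySem.Str.isIn ": error:" stripped then
      some (PySem.Str.strip (((PySem.Str.splitMax? stripped ": error:" 1).getD []).getD 1 ""))
    else some stripped

def summarize_cli_failure_alt (stdout_text : String) (stderr_text : String) : Option String :=
  match pvPickFirst (PySem.Str.splitlines stdout_text).reverse with
  | some s => some s
  | none => pvPickFirst (PySem.Str.splitlines stderr_text).reverse

-- ===== PRECONDITION & SPEC =====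
def Spec_summarize_cli_failure (stdout_text : String) (stderr_text : String) (out : Option String) : Prop := out = summarize_cli_failure_alt stdout_text stderr_text
instance (stdout_text : String) (stderr_text : String) (out : Option String) : Decidable (Spec_summarize_cli_failure stdout_text stderr_text out) := by unfold Spec_summarize_cli_failure; infer_instance

-- ===== CLAIM (what is proved, stated in full; the proofs are below) =====
def Claim_equal_summarize_cli_failure : Prop := ∀ (stdout_text : String) (stderr_text : String), Dom_summarize_cli_failure stdout_text stderr_text → Spec_summarize_cli_failure stdout_text stderr_text (summarize_cli_failure stdout_text stderr_text)

-- ===== LEMMAS AND PROOFS =====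
-- the per-line transform: none = skipped, some s = the line contributed s
def pvProc (line : String) : Option String :=
  let stripped := PySem.Str.strip line
  if stripped = "" || PySem.Str.startswith stripped "usage:" then none
  else if PySem.Str.isIn ": error:" stripped then
    some (PySem.Str.strip (((PySem.Str.splitMax? stripped ": error:" 1).getD []).getD 1 ""))
  else some stripped

theorem pvFoldl_eq (l : List String) (acc : List String) :
    l.foldl (fun acc line =>
        let stripped := PySem.Str.strip line
        if stripped = "" || PySem.Str.startswith stripped "usage:" then acc
        else if PySem.Str.isIn ": error:" stripped then
          acc ++ [PySem.Str.strip (((PySem.Str.splitMax? stripped ": error:" 1).getD []).getD 1 "")]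
        else acc ++ [stripped]) acc
    = acc ++ l.filterMap pvProc := by
  induction l generalizing acc with
  | nil => simp
  | cons x t ih =>
    simp only [List.foldl_cons, List.filterMap_cons, pvProc, ih]
    split_ifs <;> simp

theorem pvPickFirst_cons (x : String) (t : List String) :
    pvPickFirst (x :: t) = (pvProc x).or (pvPickFirst t) := by
  simp only [pvPickFirst, pvProc]
  split_ifs <;> rfl

theorem pvPickFirst_eq (l : List String) :
    pvPickFirst l = (l.filterMap pvProc).head? := by
  induction l with
  | nil => rfl
  | cons x t ih =>
    rw [pvPickFirst_cons, ih, List.filterMap_cons]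
    cases h : pvProc x <;> rfl

-- ===== VERDICT (by name: the statement is the Claim_ definition above) =====
theorem summarize_cli_failure_spec : Claim_equal_summarize_cli_failure := by
  intro o e _
  unfold Spec_summarize_cli_failure summarize_cli_failure summarize_cli_failure_alt
  simp only [List.foldl_cons, List.foldl_nil, pvFoldl_eq, pvPickFirst_eq,
    List.filterMap_reverse, List.head?_reverse, List.nil_append]
  rw [List.getLast?_append]
  cases h : ((PySem.Str.splitlines o).filterMap pvProc).getLast? <;> simp [Option.or]
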